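-- pv_equiv track=rewrite | github.com/DiggsAsura/codecademy_courses | codecademy/Python3_Intermediate/6_4_Project-Event_Coordinator.py | assign_seating
-- ===== SOURCE A (Python) =====
-- def table1(Name, Table):
--   yield (Name, "Chicken", "Table 1", "Seat {}".format(Table))
--
-- def table2(Name, Table):
--   yield (Name, "Beef", "Table 2", "Seat {}".format(Table))
--
-- def table3(Name, Table):
--   yield (Name, "Fish", "Table 2", "Seat {}".format(Table))
--
-- def assign_seating(guests):
--   counter = 1
--   for GSTs in guests:
--     if counter < 6:
--       yield from table1(GSTs, counter)
--       counter += 1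
--     elif counter < 11:
--       N = counter - 5
--       yield from table2(GSTs, N)
--       counter += 1
--     elif counter < 16:
--       N = counter - 10
--       yield from table3(GSTs, N)
--       counter += 1
--     else:
--       return "No More Seats Available"
-- ===== SOURCE B (Python) =====
-- def assign_seating(guests):
--     chart = [(meal, table, "Seat {}".format(k))
--              for meal, table in (("Chicken", "Table 1"), ("Beef", "Table 2"), ("Fish", "Table 2"))
--              for k in range(1, 6)]
--     for guest, (meal, table, seat) in zip(guests, chart):
--         yield (guest, meal, table, seat)
-- ===== Notes on version B (the rewrite author's own statement) =====
-- stated objective: simpler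
-- what changed: B precomputes the whole 15-entry seating chart (meal, table, seat) as a staged comprehension over the three configs x seats 1..5 and then zips the guests against it, so the per-guest counter, the if/elif ladder and the three helper generators disappear; zip's truncation replaces A's stop condition.
import Mathlib
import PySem

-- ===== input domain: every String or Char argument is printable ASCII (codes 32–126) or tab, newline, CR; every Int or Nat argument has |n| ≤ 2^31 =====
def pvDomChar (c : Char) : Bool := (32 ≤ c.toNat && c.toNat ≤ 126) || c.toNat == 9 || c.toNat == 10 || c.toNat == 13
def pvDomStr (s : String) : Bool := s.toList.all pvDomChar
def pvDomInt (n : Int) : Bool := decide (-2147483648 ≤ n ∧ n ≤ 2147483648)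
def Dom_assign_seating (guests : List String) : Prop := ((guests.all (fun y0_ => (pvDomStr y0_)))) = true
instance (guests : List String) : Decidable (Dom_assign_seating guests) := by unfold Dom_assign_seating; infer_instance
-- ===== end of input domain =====

-- B precomputes the full 15-entry seating chart once and zips the guests against
-- it, removing A's per-guest counter, if/elif ladder and helper generators
-- (objective: simpler). A's generator 'return "No More Seats Available"' only
-- ends iteration; the equivalence is about the yielded sequence (list of tuples).

-- ===== PORT A =====
-- helpers table1/table2/table3: each yields exactly one tuple
def table1 (Name : String) (Table : Int) : List (String × String × String × String) :=
  [(Name, "Chicken", "Table 1", "Seat " ++ PySem.Int.toStr Table)]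

def table2 (Name : String) (Table : Int) : List (String × String × String × String) :=
  [(Name, "Beef", "Table 2", "Seat " ++ PySem.Int.toStr Table)]

def table3 (Name : String) (Table : Int) : List (String × String × String × String) :=
  [(Name, "Fish", "Table 2", "Seat " ++ PySem.Int.toStr Table)]

-- the for-loop with its running counter, branches in A's order
def assign_seating_go (gs : List String) (counter : Int) : List (String × String × String × String) :=
  match gs with
  | [] => []
  | g :: rest =>
    if counter < 6 then
      table1 g counter ++ assign_seating_go rest (counter + 1)
    else if counter < 11 then
      table2 g (counter - 5) ++ assign_seating_go rest (counter + 1)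
    else if counter < 16 then
      table3 g (counter - 10) ++ assign_seating_go rest (counter + 1)
    else []

def assign_seating (guests : List String) : List (String × String × String × String) :=
  assign_seating_go guests 1

-- ===== PORT B =====
-- the staged comprehension: 3 configs × seats 1..5 → 15 chart entries
def altChart : List (String × String × String) :=
  [("Chicken", "Table 1"), ("Beef", "Table 2"), ("Fish", "Table 2")].flatMap
    (fun mt => (PySem.List.pyRange 1 6 1).map
      (fun k => (mt.1, mt.2, "Seat " ++ PySem.Int.toStr k)))

-- the for-loop over zip(guests, chart)
def assign_seating_alt (guests : List String) : List (String × String × String × String) :=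
  List.zipWith (fun g l => (g, l.1, l.2.1, l.2.2)) guests altChart

-- ===== PRECONDITION & SPEC =====
def Spec_assign_seating (guests : List String) (out : List (String × String × String × String)) : Prop := out = assign_seating_alt guests
instance (guests : List String) (out : List (String × String × String × String)) : Decidable (Spec_assign_seating guests out) := by unfold Spec_assign_seating; infer_instance

-- ===== CLAIM (what is proved, stated in full; the proofs are below) =====
def Claim_equal_assign_seating : Prop := ∀ (guests : List String), Dom_assign_seating guests → Spec_assign_seating guests (assign_seating guests)

-- ===== LEMMAS AND PROOFS =====
-- the chart evaluated to its 15 literal entries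
theorem altChart_eval : altChart =
    [("Chicken", "Table 1", "Seat 1"), ("Chicken", "Table 1", "Seat 2"),
     ("Chicken", "Table 1", "Seat 3"), ("Chicken", "Table 1", "Seat 4"),
     ("Chicken", "Table 1", "Seat 5"),
     ("Beef", "Table 2", "Seat 1"), ("Beef", "Table 2", "Seat 2"),
     ("Beef", "Table 2", "Seat 3"), ("Beef", "Table 2", "Seat 4"),
     ("Beef", "Table 2", "Seat 5"),
     ("Fish", "Table 2", "Seat 1"), ("Fish", "Table 2", "Seat 2"),
     ("Fish", "Table 2", "Seat 3"), ("Fish", "Table 2", "Seat 4"),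
     ("Fish", "Table 2", "Seat 5")] := by decide

theorem go_eq (gs : List String) : ∀ (i : Nat),
    assign_seating_go gs ((i : Int) + 1)
      = List.zipWith (fun g l => (g, l.1, l.2.1, l.2.2)) gs (altChart.drop i) := by
  induction gs with
  | nil => intro i; simp [assign_seating_go]
  | cons g rest ih =>
    intro i
    have htail : assign_seating_go rest ((i : Int) + 1 + 1)
        = List.zipWith (fun g l => (g, l.1, l.2.1, l.2.2)) rest (altChart.drop (i + 1)) := by
      have := ih (i + 1); push_cast at this ⊢; exact this
    by_cases h15 : i < 15
    · rw [altChart_eval] at htail ⊢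
      interval_cases i <;>
        simp_all [assign_seating_go, table1, table2, table3] <;> decide
    · have hnil : altChart.drop i = [] := by
        apply List.drop_eq_nil_of_le; rw [altChart_eval]; simpa using Nat.le_of_not_lt h15
      have c1 : ¬ ((i : Int) + 1 < 6) := by omega
      have c2 : ¬ ((i : Int) + 1 < 11) := by omega
      have c3 : ¬ ((i : Int) + 1 < 16) := by omega
      simp [assign_seating_go, c1, c2, c3, hnil]

-- ===== VERDICT (by name: the statement is the Claim_ definition above) =====
theorem assign_seating_spec : Claim_equal_assign_seating := by
  intro guests _
  unfold Spec_assign_seating assign_seating assign_seating_alt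
  simpa using go_eq guests 0
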